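-- pv_equiv track=rewrite | github.com/ZJU-CTAG/PPatHF | reduction/reducer.py | line_no_map
-- ===== SOURCE A (Python) =====
-- from typing import Dict, Set, Union, List, Any
--
-- def line_no_map(src_no: int, src_unique_set: Set[int], tgt_unique_set: Set[int]) -> Union[int, None]:
--     if src_no in src_unique_set:
--         return None
--     tgt_no = src_no
--     tgt_no -= len([_ for _ in src_unique_set if _ < src_no])
--     for tgt_unique_line_no in sorted(list(tgt_unique_set)):
--         if tgt_unique_line_no > tgt_no:
--             break
--         tgt_no += 1
--     return tgt_no
-- ===== SOURCE B (Python) =====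
-- def line_no_map(src_no, src_unique_set, tgt_unique_set):
--     if src_no in src_unique_set:
--         return None
--     base = src_no - sum(1 for s in src_unique_set if s < src_no)
--     tgt_no = base
--     while True:
--         count = sum(1 for t in tgt_unique_set if t <= tgt_no)
--         if count <= tgt_no - base:
--             return tgt_no
--         tgt_no = base + count
-- ===== Notes on version B (the rewrite author's own statement) =====
-- stated objective: alternative
-- what changed: Replaces A's sort of the target set followed by a single ordered scan with a sort-free fixpoint iteration: starting from base = src_no minus the count of smaller source-unique lines, repeatedly recount target-unique lines <= the candidate until the count stabilizes, which converges to the same least fixpoint.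
import Mathlib
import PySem

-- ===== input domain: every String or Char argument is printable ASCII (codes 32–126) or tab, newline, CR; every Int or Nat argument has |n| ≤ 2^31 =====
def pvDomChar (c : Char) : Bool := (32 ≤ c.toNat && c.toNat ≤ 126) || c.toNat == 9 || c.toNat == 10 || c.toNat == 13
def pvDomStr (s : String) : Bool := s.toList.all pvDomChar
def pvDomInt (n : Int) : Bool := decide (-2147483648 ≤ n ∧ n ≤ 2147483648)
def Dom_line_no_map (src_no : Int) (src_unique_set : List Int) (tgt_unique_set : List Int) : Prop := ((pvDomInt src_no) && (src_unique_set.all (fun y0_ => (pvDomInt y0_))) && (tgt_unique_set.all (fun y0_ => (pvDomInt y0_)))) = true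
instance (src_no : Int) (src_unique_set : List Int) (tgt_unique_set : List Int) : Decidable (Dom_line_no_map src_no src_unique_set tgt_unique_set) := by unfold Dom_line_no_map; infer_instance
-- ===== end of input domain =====

-- B replaces A's sort-then-scan with a sort-free fixpoint iteration (alternative decomposition,
-- same return value); neither version mutates its arguments.

-- ===== PORT A =====
-- the 'for tgt_unique_line_no in sorted(...)' loop with its early 'break'
def lineAGo : List Int → Int → Int
  | [], tgt_no => tgt_no
  | x :: xs, tgt_no => if x > tgt_no then tgt_no else lineAGo xs (tgt_no + 1)

def line_no_map (src_no : Int) (src_unique_set : List Int) (tgt_unique_set : List Int) : Option Int :=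
  if src_no ∈ src_unique_set then none
  else
    let tgt_no := src_no - ((src_unique_set.filter (fun s => s < src_no)).length : Int)
    some (lineAGo (PySem.List.sorted tgt_unique_set (fun x => x) false) tgt_no)

-- ===== PORT B =====
-- sum(1 for t in tgt_unique_set if t <= x)
def countLe (tgt : List Int) (x : Int) : Int := (tgt.countP (fun t => t ≤ x) : Int)

-- the 'while True' recount loop of Source B; the fuel (length+1) only makes the loop's
-- termination explicit (the count strictly grows each round, bounded by the length)
def lineBGo (tgt : List Int) (base : Int) : Nat → Int → Int
  | 0, tgt_no => tgt_no
  | fuel + 1, tgt_no =>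
      let count := countLe tgt tgt_no
      if count ≤ tgt_no - base then tgt_no else lineBGo tgt base fuel (base + count)

def line_no_map_alt (src_no : Int) (src_unique_set : List Int) (tgt_unique_set : List Int) : Option Int :=
  if src_no ∈ src_unique_set then none
  else
    let base := src_no - (src_unique_set.countP (fun s => s < src_no) : Int)
    some (lineBGo tgt_unique_set base (tgt_unique_set.length + 1) base)

-- ===== PRECONDITION & SPEC =====
def Spec_line_no_map (src_no : Int) (src_unique_set : List Int) (tgt_unique_set : List Int) (out : Option Int) : Prop := out = line_no_map_alt src_no src_unique_set tgt_unique_set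
instance (src_no : Int) (src_unique_set : List Int) (tgt_unique_set : List Int) (out : Option Int) : Decidable (Spec_line_no_map src_no src_unique_set tgt_unique_set out) := by unfold Spec_line_no_map; infer_instance

-- ===== CLAIM (what is proved, stated in full; the proofs are below) =====
def Claim_equal_line_no_map : Prop := ∀ (src_no : Int) (src_unique_set : List Int) (tgt_unique_set : List Int), Dom_line_no_map src_no src_unique_set tgt_unique_set → Spec_line_no_map src_no src_unique_set tgt_unique_set (line_no_map src_no src_unique_set tgt_unique_set)

-- ===== LEMMAS AND PROOFS =====

theorem countLe_nonneg (l : List Int) (x : Int) : 0 ≤ countLe l x := by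
  unfold countLe; positivity

theorem countLe_le_length (l : List Int) (x : Int) : countLe l x ≤ (l.length : Int) := by
  unfold countLe
  exact_mod_cast List.countP_le_length (l := l)

theorem countLe_mono (l : List Int) {a b : Int} (h : a ≤ b) : countLe l a ≤ countLe l b := by
  unfold countLe
  have := List.countP_mono_left (l := l) (p := fun t => decide (t ≤ a))
    (q := fun t => decide (t ≤ b)) (by intro x _ hx; simp_all; omega)
  exact_mod_cast this

-- A's scan over the sorted list computes the least r ≥ t with countLe l r ≤ r - t
theorem lineAGo_spec (l : List Int) (t : Int) (hs : l.Pairwise (fun a b => a ≤ b)) :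
    t ≤ lineAGo l t ∧ countLe l (lineAGo l t) ≤ lineAGo l t - t ∧
      ∀ y, t ≤ y → y < lineAGo l t → ¬ (countLe l y ≤ y - t) := by
  induction l generalizing t with
  | nil =>
    refine ⟨le_refl t, by simp [lineAGo, countLe], ?_⟩
    intro y h1 h2
    simp [lineAGo] at h2
    omega
  | cons x xs ih =>
    rcases List.pairwise_cons.mp hs with ⟨hx, hxs⟩
    by_cases hxt : x > t
    · have hres : lineAGo (x :: xs) t = t := by simp [lineAGo, hxt]
      refine ⟨by omega, ?_, ?_⟩
      · have hz : countLe (x :: xs) t = 0 := by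
          unfold countLe
          have : (x :: xs).countP (fun t' => decide (t' ≤ t)) = 0 := by
            apply List.countP_eq_zero.mpr
            intro a ha
            rcases List.mem_cons.mp ha with h | h
            · subst h; simp; omega
            · have := hx a h; simp; omega
          omega
        rw [hres, hz]; omega
      · intro y h1 h2; rw [hres] at h2; omega
    · push Not at hxt
      have hres : lineAGo (x :: xs) t = lineAGo xs (t + 1) := by
        simp [lineAGo]; omega
      obtain ⟨ih1, ih2, ih3⟩ := ih (t + 1) hxs
      have hcons : ∀ y, x ≤ y → countLe (x :: xs) y = countLe xs y + 1 := by
        intro y hy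
        unfold countLe
        simp [hy]
      refine ⟨by omega, ?_, ?_⟩
      · rw [hres, hcons _ (by omega)]
        omega
      · intro y h1 h2
        rw [hres] at h2
        rcases eq_or_lt_of_le h1 with h | h
        · subst h
          rw [hcons _ hxt]
          have := countLe_nonneg xs t
          omega
        · have := ih3 y (by omega) h2
          rw [hcons _ (by omega)]
          omega

-- B's recount loop converges to that same least r
theorem lineBGo_reaches (tgt : List Int) (base r : Int)
    (hr2 : countLe tgt r ≤ r - base)
    (hmin : ∀ y, base ≤ y → y < r → ¬ (countLe tgt y ≤ y - base)) :
    ∀ fuel t, base ≤ t → t ≤ r → (r - t).toNat < fuel → lineBGo tgt base fuel t = r := by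
  intro fuel
  induction fuel with
  | zero => intro t _ _ h; omega
  | succ fuel ih =>
    intro t ht1 ht2 hfuel
    show (if countLe tgt t ≤ t - base then t else lineBGo tgt base fuel (base + countLe tgt t)) = r
    by_cases hc : countLe tgt t ≤ t - base
    · rw [if_pos hc]
      rcases eq_or_lt_of_le ht2 with h | h
      · exact h
      · exact absurd hc (hmin t ht1 h)
    · rw [if_neg hc]
      push Not at hc
      have htr : t < r := by
        rcases eq_or_lt_of_le ht2 with h | h
        · subst h; omega
        · exact h
      have hmono := countLe_mono tgt (le_of_lt htr)
      have hnn := countLe_nonneg tgt t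
      exact ih (base + countLe tgt t) (by omega) (by omega) (by omega)

-- ===== VERDICT (by name: the statement is the Claim_ definition above) =====
theorem line_no_map_spec : Claim_equal_line_no_map := by
  intro src_no src tgt _
  unfold Spec_line_no_map line_no_map line_no_map_alt
  by_cases hmem : src_no ∈ src
  · simp [hmem]
  · simp only [if_neg hmem]
    -- the two base computations agree
    have hbase : src_no - ((src.filter (fun s => s < src_no)).length : Int)
        = src_no - (src.countP (fun s => s < src_no) : Int) := by
      rw [List.countP_eq_length_filter]
    set t0 := src_no - (src.countP (fun s => s < src_no) : Int) with ht0
    rw [hbase]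
    -- A's sorted scan
    set l := PySem.List.sorted tgt (fun x => x) false with hl
    have hperm : l.Perm tgt := PySem.List.sorted_perm tgt (fun x => x) false
    have hpw : l.Pairwise (fun a b => a ≤ b) := by
      have := PySem.List.sorted_pairwise (xs := tgt) (key := fun x => x)
      simpa using this
    obtain ⟨h1, h2, h3⟩ := lineAGo_spec l t0 hpw
    have hcnt : ∀ y, countLe l y = countLe tgt y := by
      intro y; unfold countLe; rw [hperm.countP_eq]
    set r := lineAGo l t0 with hr
    rw [hcnt] at h2
    have h3' : ∀ y, t0 ≤ y → y < r → ¬ (countLe tgt y ≤ y - t0) := by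
      intro y hy1 hy2; rw [← hcnt]; exact h3 y hy1 hy2
    -- r ≤ t0 + length tgt, so fuel length+1 suffices
    have hbound : r ≤ t0 + (tgt.length : Int) := by
      by_contra hgt
      push Not at hgt
      exact h3' (t0 + (tgt.length : Int)) (by
          have := Int.natCast_nonneg tgt.length; omega) hgt
        (by have := countLe_le_length tgt (t0 + (tgt.length : Int)); omega)
    have := lineBGo_reaches tgt t0 r h2
      (fun y hy1 hy2 => h3' y hy1 hy2) (tgt.length + 1) t0 (le_refl t0) h1 (by omega)
    rw [this]
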